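-- pv_equiv track=rewrite | github.com/ArchdukeViel/NovelAITranslator2Book | src/novelai/tui/screens/pipeline.py | _serialize_chapter_selection
-- ===== SOURCE A (Python) =====
-- def _serialize_chapter_selection(numbers: list[int]) -> str | None:
--     if not numbers:
--         return None
--
--     segments: list[str] = []
--     start = numbers[0]
--     end = numbers[0]
--     for number in numbers[1:]:
--         if number == end + 1:
--             end = number
--             continue
--         segments.append(f"{start}-{end}" if start != end else str(start))
--         start = number
--         end = number
--     segments.append(f"{start}-{end}" if start != end else str(start))
--     return ";".join(segments)
-- ===== SOURCE B (Python) =====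
-- def _serialize_chapter_selection(numbers: list[int]) -> str | None:
--     if not numbers:
--         return None
--     n = len(numbers)
--     # Stage 1: indices where a new segment starts (a "break" sits before index i).
--     breaks = [i for i in range(1, n) if numbers[i] - numbers[i - 1] != 1]
--     bounds = [0] + breaks + [n]
--     # Stage 2: one segment per adjacent pair of bounds, read off by direct indexing.
--     parts = []
--     for lo, hi in zip(bounds, bounds[1:]):
--         a, b = numbers[lo], numbers[hi - 1]
--         parts.append(str(a) if a == b else f"{a}-{b}")
--     return ";".join(parts)
-- ===== Notes on version B (the rewrite author's own statement) =====
-- stated objective: alternative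
-- what changed: B works in two staged index-based passes: a comprehension over range(1,n) collects the break indices, they become a bounds list, and each adjacent bounds pair is formatted by direct indexing with zip - instead of A's single stateful fold carrying start/end scalars and emitting segment strings inline.
import Mathlib
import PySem

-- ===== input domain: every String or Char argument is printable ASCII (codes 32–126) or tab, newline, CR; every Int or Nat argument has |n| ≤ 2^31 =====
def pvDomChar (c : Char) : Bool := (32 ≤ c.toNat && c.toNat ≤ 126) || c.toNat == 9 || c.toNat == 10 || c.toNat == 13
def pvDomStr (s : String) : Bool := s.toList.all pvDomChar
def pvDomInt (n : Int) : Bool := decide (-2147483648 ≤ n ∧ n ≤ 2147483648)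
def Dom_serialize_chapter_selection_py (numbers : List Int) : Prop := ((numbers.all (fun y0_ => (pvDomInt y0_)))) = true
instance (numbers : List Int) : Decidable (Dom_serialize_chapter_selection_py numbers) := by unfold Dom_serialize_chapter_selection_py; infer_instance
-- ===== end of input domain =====

-- B replaces A's single stateful fold (start/end scalars, strings emitted inline) by two
-- staged index-based passes: collect break indices, then format each adjacent bounds pair
-- by direct indexing (alternative decomposition, same O(n) cost).

-- ===== PORT A =====
-- f"{start}-{end}" if start != end else str(start)
def pvFmtA (s e : Int) : String :=
  if s != e then PySem.Int.toStr s ++ "-" ++ PySem.Int.toStr e else PySem.Int.toStr s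

-- the loop body: state = (segments, start, end)
def pvStepA (acc : List String × Int × Int) (number : Int) : List String × Int × Int :=
  if number == acc.2.2 + 1 then (acc.1, acc.2.1, number)
  else (acc.1 ++ [pvFmtA acc.2.1 acc.2.2], number, number)

def serialize_chapter_selection_py (numbers : List Int) : Option String :=
  match numbers with
  | [] => none
  | n0 :: rest =>
    let st := rest.foldl pvStepA ([], n0, n0)
    some (PySem.Str.join ";" (st.1 ++ [pvFmtA st.2.1 st.2.2]))

-- ===== PORT B =====
-- numbers[i] - numbers[i-1] != 1  (i is always in range in Source B, so getD is exact)
def pvBreakB (numbers : List Int) (i : Nat) : Bool :=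
  numbers.getD i 0 - numbers.getD (i - 1) 0 != 1

-- str(a) if a == b else f"{a}-{b}"
def pvFmtB (a b : Int) : String :=
  if a == b then PySem.Int.toStr a else PySem.Int.toStr a ++ "-" ++ PySem.Int.toStr b

def serialize_chapter_selection_py_alt (numbers : List Int) : Option String :=
  if numbers.isEmpty then none
  else
    let n := numbers.length
    -- breaks = [i for i in range(1, n) if numbers[i] - numbers[i-1] != 1]
    let breaks := (List.range' 1 (n - 1)).filter (pvBreakB numbers)
    -- bounds = [0] + breaks + [n]
    let bounds := 0 :: (breaks ++ [n])
    -- parts: one per (lo, hi) in zip(bounds, bounds[1:]); a = numbers[lo], b = numbers[hi-1]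
    let parts := (bounds.zip bounds.tail).map
      (fun p => pvFmtB (numbers.getD p.1 0) (numbers.getD (p.2 - 1) 0))
    some (PySem.Str.join ";" parts)

-- ===== PRECONDITION & SPEC =====
def Spec_serialize_chapter_selection_py (numbers : List Int) (out : Option String) : Prop := out = serialize_chapter_selection_py_alt numbers
instance (numbers : List Int) (out : Option String) : Decidable (Spec_serialize_chapter_selection_py numbers out) := by unfold Spec_serialize_chapter_selection_py; infer_instance

-- ===== CLAIM (what is proved, stated in full; the proofs are below) =====
def Claim_equal_serialize_chapter_selection_py : Prop := ∀ (numbers : List Int), Dom_serialize_chapter_selection_py numbers → Spec_serialize_chapter_selection_py numbers (serialize_chapter_selection_py numbers)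

-- ===== LEMMAS AND PROOFS =====

-- the list of (start, end) pairs of the maximal consecutive runs, as A's loop walks them
def pvPairsRuns (s e : Int) : List Int → List (Int × Int)
  | [] => [(s, e)]
  | n :: l => if n = e + 1 then pvPairsRuns s n l else (s, e) :: pvPairsRuns n n l

-- B's stage-2 pairs, abstracted over the bounds list
def pvZipPairs (numbers : List Int) (bounds : List Nat) : List (Int × Int) :=
  (bounds.zip bounds.tail).map (fun p => (numbers.getD p.1 0, numbers.getD (p.2 - 1) 0))

theorem pvFmtAB (s e : Int) : pvFmtA s e = pvFmtB s e := by
  by_cases h : s = e <;> simp [pvFmtA, pvFmtB, h]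

-- A's fold produces the formatted run pairs
theorem pvA_fold (l : List Int) : ∀ (segs : List String) (s e : Int),
    (let st := l.foldl pvStepA (segs, s, e)
     st.1 ++ [pvFmtA st.2.1 st.2.2]) = segs ++ (pvPairsRuns s e l).map (fun p => pvFmtA p.1 p.2) := by
  induction l with
  | nil => intro segs s e; simp [pvPairsRuns]
  | cons n l ih =>
    intro segs s e
    by_cases h : n = e + 1
    · have : pvStepA (segs, s, e) n = (segs, s, n) := by simp [pvStepA, h]
      simp only [List.foldl_cons, this, pvPairsRuns, if_pos h]
      exact ih segs s n
    · have : pvStepA (segs, s, e) n = (segs ++ [pvFmtA s e], n, n) := by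
        simp [pvStepA, h]
      simp only [List.foldl_cons, this, pvPairsRuns, if_neg h]
      rw [ih (segs ++ [pvFmtA s e]) n n]
      simp
  
-- pvPairsRuns only uses its first argument as the start of the first pair
theorem pvPairs_start (l : List Int) : ∀ (e s s' : Int), ∃ w r,
    pvPairsRuns s e l = (s, w) :: r ∧ pvPairsRuns s' e l = (s', w) :: r := by
  induction l with
  | nil => intro e s s'; exact ⟨e, [], rfl, rfl⟩
  | cons n l ih =>
    intro e s s'
    by_cases h : n = e + 1
    · subst h
      obtain ⟨w, r, h1, h2⟩ := ih (e + 1) s s'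
      exact ⟨w, r, by simp [pvPairsRuns, h1], by simp [pvPairsRuns, h2]⟩
    · exact ⟨e, pvPairsRuns n n l, by simp [pvPairsRuns, h], by simp [pvPairsRuns, h]⟩

-- shifting all bounds by one and prepending an element leaves the pairs unchanged
theorem pvShiftPairs (bs : List Nat) (x : Int) (rest : List Int)
    (h : ∀ b ∈ bs.tail, 1 ≤ b) :
    pvZipPairs (x :: rest) (bs.map (· + 1)) = pvZipPairs rest bs := by
  induction bs with
  | nil => rfl
  | cons b bs ih =>
    cases bs with
    | nil => rfl
    | cons c cs =>
      have hc : 1 ≤ c := h c (by simp)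
      have ih' := ih (fun b hb => h b (List.mem_cons_of_mem _ hb))
      simp only [List.map_cons, pvZipPairs, List.tail_cons, List.zip_cons_cons, List.map_cons]
        at ih' ⊢
      rw [ih']
      have h1 : c + 1 - 1 = c := by omega
      rw [h1]
      obtain ⟨c', rfl⟩ : ∃ c', c = c' + 1 := ⟨c - 1, by omega⟩
      simp

-- the break predicate shifts under cons for indices ≥ 1
theorem pvBreak_shift (x : Int) (rest : List Int) (i : Nat) (hi : 1 ≤ i) :
    pvBreakB (x :: rest) (i + 1) = pvBreakB rest i := by
  unfold pvBreakB
  obtain ⟨j, rfl⟩ : ∃ j, i = j + 1 := ⟨i - 1, by omega⟩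
  simp

theorem pvBreaks_shift (x : Int) (rest : List Int) (k : Nat) :
    (List.range' 2 k).filter (pvBreakB (x :: rest))
      = ((List.range' 1 k).filter (pvBreakB rest)).map (· + 1) := by
  have h2 : List.range' 2 k = (List.range' 1 k).map (· + 1) := by
    rw [List.range'_eq_map_range, List.range'_eq_map_range, List.map_map]
    exact List.map_congr_left (fun a _ => by simp only [Function.comp_apply]; omega)
  rw [h2, List.filter_map]
  congr 1
  apply List.filter_congr
  intro i hi
  have h1 : 1 ≤ i := (List.mem_range'_1.mp hi).1
  exact pvBreak_shift x rest i h1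

-- every break index is ≥ 1
theorem pvBreaks_ge_one (numbers : List Int) (k s : Nat) (hs : 1 ≤ s) :
    ∀ b ∈ (List.range' s k).filter (pvBreakB numbers), 1 ≤ b := by
  intro b hb
  have := (List.mem_range'_1.mp (List.mem_of_mem_filter hb)).1
  omega

-- main B characterisation: the stage-2 pairs are exactly the run pairs
theorem pvB_main (xs : List Int) : ∀ (x : Int),
    pvZipPairs (x :: xs)
      (0 :: ((List.range' 1 xs.length).filter (pvBreakB (x :: xs)) ++ [xs.length + 1]))
      = pvPairsRuns x x xs := by
  induction xs with
  | nil => intro x; simp [pvZipPairs, pvPairsRuns]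
  | cons y tl ih =>
    intro x
    have hlen : (y :: tl).length = tl.length + 1 := rfl
    have hrange : List.range' 1 (tl.length + 1) = 1 :: List.range' 2 tl.length := by
      rw [List.range'_succ]
    have hshift := pvBreaks_shift x (y :: tl) tl.length
    set br : List Nat := (List.range' 1 tl.length).filter (pvBreakB (y :: tl)) with hbr
    have hbr1 : ∀ b ∈ br ++ [tl.length + 1], 1 ≤ b := by
      intro b hb
      rcases List.mem_append.mp hb with h | h
      · exact pvBreaks_ge_one (y :: tl) tl.length 1 le_rfl b h
      · simp at h; omega
    have hb1 : pvBreakB (x :: y :: tl) 1 = (y - x != 1) := by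
      simp [pvBreakB]
    by_cases hxy : y = x + 1
    · -- run continues: no break at index 1
      have hb1' : pvBreakB (x :: y :: tl) 1 = false := by
        rw [hb1]; simp [hxy]
      have hfilter : (List.range' 1 ((y :: tl).length)).filter (pvBreakB (x :: y :: tl))
          = br.map (· + 1) := by
        rw [hlen, hrange, List.filter_cons, hb1', hshift, hbr]
        simp
      rw [hfilter]
      -- bounds = 0 :: (br ++ [tl.length+1]).map (+1)
      have hmap : br.map (· + 1) ++ [(y :: tl).length + 1]
          = ((br ++ [tl.length + 1]).map (· + 1)) := by
        simp [hlen]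
      rw [hmap]
      -- decompose the head of br ++ [tl.length+1]
      obtain ⟨h, t, hht⟩ : ∃ h t, br ++ [tl.length + 1] = h :: t := by
        cases hb : br ++ [tl.length + 1] with
        | nil => exact absurd hb (by simp)
        | cons h t => exact ⟨h, t, rfl⟩
      have hh1 : 1 ≤ h := hbr1 h (hht ▸ List.mem_cons_self ..)
      have hht1 : ∀ b ∈ t, 1 ≤ b := fun b hb => hbr1 b (hht ▸ List.mem_cons_of_mem _ hb)
      have htail : pvZipPairs (x :: y :: tl) ((h :: t).map (· + 1))
          = pvZipPairs (y :: tl) (h :: t) := by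
        exact pvShiftPairs (h :: t) x (y :: tl) (by simpa using hht1)
      have hIH := ih y
      rw [hht] at hIH ⊢
      -- head pair of the LHS: (x, (y::tl).getD (h-1))
      have hLHS : pvZipPairs (x :: y :: tl) (0 :: (h :: t).map (· + 1))
          = ((x : Int), (y :: tl).getD (h - 1) 0) :: pvZipPairs (x :: y :: tl) ((h :: t).map (· + 1)) := by
        simp only [List.map_cons, pvZipPairs, List.tail_cons, List.zip_cons_cons]
        refine congrArg₂ _ ?_ rfl
        have : h + 1 - 1 = h := by omega
        rw [this]
        obtain ⟨j, rfl⟩ : ∃ j, h = j + 1 := ⟨h - 1, by omega⟩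
        simp
      have hRHS : pvZipPairs (y :: tl) (0 :: h :: t)
          = ((y : Int), (y :: tl).getD (h - 1) 0) :: pvZipPairs (y :: tl) (h :: t) := by
        simp only [pvZipPairs, List.tail_cons, List.zip_cons_cons, List.map_cons]
        rfl
      rw [hLHS, htail]
      rw [hRHS] at hIH
      -- use the start-replacement property of pvPairsRuns
      obtain ⟨w, r, hxw, hyw⟩ := pvPairs_start tl y x y
      have : pvPairsRuns x x (y :: tl) = pvPairsRuns x y tl := by
        simp [pvPairsRuns, hxy]
      rw [this, hxw]
      have := hIH.trans hyw
      obtain ⟨hw, hr⟩ : ((y : Int), (y :: tl).getD (h - 1) 0) = (y, w)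
          ∧ pvZipPairs (y :: tl) (h :: t) = r := by
        constructor
        · exact (List.cons.injEq .. ▸ this).1
        · exact (List.cons.injEq .. ▸ this).2
      rw [← hr]
      have hw' : (y :: tl).getD (h - 1) 0 = w := (Prod.mk.injEq .. ▸ hw).2
      rw [hw']
    · -- new run starts at y: break at index 1
      have hb1' : pvBreakB (x :: y :: tl) 1 = true := by
        rw [hb1]
        simp only [bne_iff_ne, ne_eq]
        omega
      have hfilter : (List.range' 1 ((y :: tl).length)).filter (pvBreakB (x :: y :: tl))
          = 1 :: br.map (· + 1) := by
        rw [hlen, hrange, List.filter_cons, hb1', hshift, hbr]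
        simp
      rw [hfilter]
      have hmap : (1 :: br.map (· + 1)) ++ [(y :: tl).length + 1]
          = ((0 :: (br ++ [tl.length + 1])).map (· + 1)) := by
        simp [hlen]
      rw [List.cons_append] at hmap ⊢
      rw [hmap]
      have htail : pvZipPairs (x :: y :: tl) ((0 :: (br ++ [tl.length + 1])).map (· + 1))
          = pvZipPairs (y :: tl) (0 :: (br ++ [tl.length + 1])) :=
        pvShiftPairs _ x (y :: tl) (by simpa using hbr1)
      have hhead : pvZipPairs (x :: y :: tl)
            (0 :: (0 :: (br ++ [tl.length + 1])).map (· + 1))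
          = ((x : Int), x) :: pvZipPairs (x :: y :: tl) ((0 :: (br ++ [tl.length + 1])).map (· + 1)) := by
        simp only [List.map_cons, pvZipPairs, List.tail_cons, List.zip_cons_cons, List.map_cons]
        rfl
      rw [hhead, htail, ih y]
      simp [pvPairsRuns, hxy]

-- ===== VERDICT (by name: the statement is the Claim_ definition above) =====
theorem serialize_chapter_selection_py_spec : Claim_equal_serialize_chapter_selection_py := by
  intro numbers _
  unfold Spec_serialize_chapter_selection_py serialize_chapter_selection_py serialize_chapter_selection_py_alt
  cases numbers with
  | nil => rfl
  | cons x xs =>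
    simp only [List.isEmpty_cons, Bool.false_eq_true, if_false]
    congr 1
    rw [pvA_fold xs [] x x, List.nil_append]
    have hparts : (let bounds : List Nat :=
          0 :: (((List.range' 1 ((x :: xs).length - 1)).filter (pvBreakB (x :: xs))) ++ [(x :: xs).length])
        (bounds.zip bounds.tail).map
          (fun p => pvFmtB ((x :: xs).getD p.1 0) ((x :: xs).getD (p.2 - 1) 0)))
        = (pvZipPairs (x :: xs)
            (0 :: (((List.range' 1 xs.length).filter (pvBreakB (x :: xs))) ++ [xs.length + 1]))).map
          (fun p => pvFmtB p.1 p.2) := by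
      simp [pvZipPairs, List.map_map, Function.comp_def, List.length_cons]
    rw [hparts, pvB_main xs x]
    congr 1
    exact List.map_congr_left (fun p _ => pvFmtAB p.1 p.2)
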